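-- pv_equiv track=rewrite | github.com/subetech/oozie_job_generator | generator/main/old.py | define_partitions
-- ===== SOURCE A (Python) =====
-- def find_in_list(some_list, keyword):
--     for l in some_list:
--         if l.find(keyword) != -1:
--             return l
--     return None
--
-- def define_partitions(fields):
--     all_fields = [x[0] for x in fields]
--     in_list = find_in_list(all_fields, "updated")
--     if in_list is not None:
--         return in_list
--     in_list = find_in_list(all_fields, "created")
--     if in_list is not None:
--         return in_list
--     in_list = find_in_list(all_fields, "timestamp")
--     if in_list is not None:
--         return in_list
--     return ""
-- ===== SOURCE B (Python) =====
-- def define_partitions(fields):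
--     updated = created = timestamp = None
--     for name, _ in fields:
--         if updated is None and "updated" in name:
--             updated = name
--         if created is None and "created" in name:
--             created = name
--         if timestamp is None and "timestamp" in name:
--             timestamp = name
--     if updated is not None:
--         return updated
--     if created is not None:
--         return created
--     if timestamp is not None:
--         return timestamp
--     return ""
-- ===== Notes on version B (the rewrite author's own statement) =====
-- stated objective: alternative
-- what changed: B replaces A's three separate scans (one find_in_list call per keyword) with a single pass that records the first field name containing each keyword in three slots and then selects by priority.
import Mathlib
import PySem

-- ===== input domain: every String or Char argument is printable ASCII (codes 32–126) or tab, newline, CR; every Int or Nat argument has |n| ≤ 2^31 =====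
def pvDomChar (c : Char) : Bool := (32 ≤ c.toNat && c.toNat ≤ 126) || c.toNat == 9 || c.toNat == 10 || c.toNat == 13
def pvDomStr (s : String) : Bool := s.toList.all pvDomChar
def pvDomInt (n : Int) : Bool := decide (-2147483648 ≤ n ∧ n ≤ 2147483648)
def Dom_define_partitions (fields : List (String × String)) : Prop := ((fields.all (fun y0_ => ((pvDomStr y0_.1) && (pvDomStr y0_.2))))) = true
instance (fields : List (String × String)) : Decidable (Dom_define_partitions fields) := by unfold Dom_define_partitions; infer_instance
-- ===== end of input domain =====

-- B: single pass recording first match per keyword, then priority selection (alternative decomposition; A scans up to three times).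
-- ===== PORT A =====
def find_in_list (some_list : List String) (keyword : String) : Option String :=
  match some_list with
  | [] => none
  | l :: rest => if PySem.Str.find l keyword ≠ -1 then some l else find_in_list rest keyword

def define_partitions (fields : List (String × String)) : String :=
  let all_fields := fields.map (fun x => x.1)
  match find_in_list all_fields "updated" with
  | some l => l
  | none =>
    match find_in_list all_fields "created" with
    | some l => l
    | none =>
      match find_in_list all_fields "timestamp" with
      | some l => l
      | none => ""

-- ===== PORT B =====
def dpStep (s : Option String × Option String × Option String) (p : String × String) :
    Option String × Option String × Option String :=
  let name := p.1
  ((if s.1 = none ∧ PySem.Str.isIn "updated" name then some name else s.1),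
   (if s.2.1 = none ∧ PySem.Str.isIn "created" name then some name else s.2.1),
   (if s.2.2 = none ∧ PySem.Str.isIn "timestamp" name then some name else s.2.2))

def define_partitions_alt (fields : List (String × String)) : String :=
  let s := fields.foldl dpStep (none, none, none)
  match s.1 with
  | some v => v
  | none =>
    match s.2.1 with
    | some v => v
    | none =>
      match s.2.2 with
      | some v => v
      | none => ""

-- ===== PRECONDITION & SPEC =====
def Spec_define_partitions (fields : List (String × String)) (out : String) : Prop := out = define_partitions_alt fields
instance (fields : List (String × String)) (out : String) : Decidable (Spec_define_partitions fields out) := by unfold Spec_define_partitions; infer_instance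

-- ===== CLAIM (what is proved, stated in full; the proofs are below) =====
def Claim_equal_define_partitions : Prop := ∀ (fields : List (String × String)), Dom_define_partitions fields → Spec_define_partitions fields (define_partitions fields)

-- ===== LEMMAS AND PROOFS =====

theorem isIn_iff_find_ne (kw name : String) :
    (PySem.Str.isIn kw name = true) ↔ PySem.Str.find name kw ≠ -1 := by
  rw [PySem.Str.isIn_iff_infix, PySem.Str.find_ne_neg_one_iff]

theorem fold_char (fields : List (String × String))
    (s : Option String × Option String × Option String) :
    fields.foldl dpStep s =
      ((s.1.orElse fun _ => find_in_list (fields.map (fun x => x.1)) "updated"),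
       (s.2.1.orElse fun _ => find_in_list (fields.map (fun x => x.1)) "created"),
       (s.2.2.orElse fun _ => find_in_list (fields.map (fun x => x.1)) "timestamp")) := by
  induction fields generalizing s with
  | nil => cases s with | mk a bc => cases bc with | mk b c =>
      cases a <;> cases b <;> cases c <;> simp [find_in_list, Option.orElse]
  | cons hd tl ih =>
      rw [List.foldl_cons, ih]
      obtain ⟨a, b, c⟩ := s
      simp only [dpStep, List.map_cons, find_in_list]
      refine Prod.ext ?_ (Prod.ext ?_ ?_) <;> simp only
      · cases a with
        | some v => rfl
        | none =>
          cases hh : PySem.Str.isIn "updated" hd.1 with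
          | true =>
            rw [if_pos ⟨rfl, rfl⟩, if_pos ((isIn_iff_find_ne "updated" hd.1).mp hh)]
            rfl
          | false =>
            rw [if_neg (by simp),
                if_neg (fun hc => by have h2 := (isIn_iff_find_ne "updated" hd.1).mpr hc; simp_all)]
      · cases b with
        | some v => rfl
        | none =>
          cases hh : PySem.Str.isIn "created" hd.1 with
          | true =>
            rw [if_pos ⟨rfl, rfl⟩, if_pos ((isIn_iff_find_ne "created" hd.1).mp hh)]
            rfl
          | false =>
            rw [if_neg (by simp),
                if_neg (fun hc => by have h2 := (isIn_iff_find_ne "created" hd.1).mpr hc; simp_all)]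
      · cases c with
        | some v => rfl
        | none =>
          cases hh : PySem.Str.isIn "timestamp" hd.1 with
          | true =>
            rw [if_pos ⟨rfl, rfl⟩, if_pos ((isIn_iff_find_ne "timestamp" hd.1).mp hh)]
            rfl
          | false =>
            rw [if_neg (by simp),
                if_neg (fun hc => by have h2 := (isIn_iff_find_ne "timestamp" hd.1).mpr hc; simp_all)]

-- ===== VERDICT (by name: the statement is the Claim_ definition above) =====
theorem define_partitions_spec : Claim_equal_define_partitions := by
  intro fields _
  simp only [Spec_define_partitions, define_partitions, define_partitions_alt]
  rw [fold_char]
  cases find_in_list (fields.map (fun x => x.1)) "updated" <;>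
    cases find_in_list (fields.map (fun x => x.1)) "created" <;>
      cases find_in_list (fields.map (fun x => x.1)) "timestamp" <;>
        simp [Option.orElse]
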